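-- pv_equiv track=rewrite | github.com/nedimazar/SAT-Solver | src/DPLL.py | minClauses
-- ===== SOURCE A (Python) =====
-- def get_clause_size(clause):
--     counter = 0
--     for literal in clause:
--         counter = counter + 1
--     return counter
--
-- def minClauses(clauses):
--     minClauses = [];
--     size = -1;
--     for clause in clauses:
--         clauseSize = get_clause_size(clause)
--         # Either the current clause is smaller
--         if size == -1 or clauseSize < size:
--             minClauses = [clause]
--             size = clauseSize
--         # Or it is of minimum size as well
--         elif clauseSize == size:
--             minClauses.append(clause)
--     return minClauses
-- ===== SOURCE B (Python) =====
-- def minClauses(clauses):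
--     if not clauses:
--         return []
--     m = min(len(c) for c in clauses)
--     return [c for c in clauses if len(c) == m]
-- ===== Notes on version B (the rewrite author's own statement) =====
-- stated objective: simpler
-- what changed: Replaces the single running-minimum accumulator loop (with the -1 sentinel and hand-counted clause sizes) by a two-pass min-then-filter using builtin len and min.
import Mathlib
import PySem

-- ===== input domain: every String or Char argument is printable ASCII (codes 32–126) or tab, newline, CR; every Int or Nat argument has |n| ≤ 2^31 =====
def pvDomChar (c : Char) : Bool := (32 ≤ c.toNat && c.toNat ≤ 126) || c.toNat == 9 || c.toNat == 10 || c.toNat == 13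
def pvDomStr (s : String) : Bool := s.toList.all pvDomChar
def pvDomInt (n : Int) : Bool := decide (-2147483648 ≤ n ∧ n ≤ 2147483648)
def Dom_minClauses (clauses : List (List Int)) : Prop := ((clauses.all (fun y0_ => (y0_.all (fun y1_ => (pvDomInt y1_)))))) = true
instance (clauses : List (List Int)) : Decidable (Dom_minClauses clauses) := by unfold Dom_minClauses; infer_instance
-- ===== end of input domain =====

-- B replaces A's single running-minimum accumulator loop by a two-pass min-then-filter (objective: simpler).

-- ===== PORT A =====
-- port of get_clause_size: hand-counting loop
def getClauseSize (clause : List Int) : Int :=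
  clause.foldl (fun counter _ => counter + 1) 0

def minClauses (clauses : List (List Int)) : List (List Int) :=
  (clauses.foldl (fun (st : List (List Int) × Int) clause =>
      let clauseSize := getClauseSize clause
      if st.2 == -1 || clauseSize < st.2 then ([clause], clauseSize)
      else if clauseSize == st.2 then (st.1 ++ [clause], st.2)
      else st)
    ([], -1)).1

-- ===== PORT B =====
def minClauses_alt (clauses : List (List Int)) : List (List Int) :=
  match ((clauses.map (fun c => (c.length : Int))).min?) with
  | none => []
  | some m => clauses.filter (fun c => (c.length : Int) == m)

-- ===== PRECONDITION & SPEC =====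
def Spec_minClauses (clauses : List (List Int)) (out : List (List Int)) : Prop := out = minClauses_alt clauses
instance (clauses : List (List Int)) (out : List (List Int)) : Decidable (Spec_minClauses clauses out) := by unfold Spec_minClauses; infer_instance

-- ===== CLAIM (what is proved, stated in full; the proofs are below) =====
def Claim_equal_minClauses : Prop := ∀ (clauses : List (List Int)), Dom_minClauses clauses → Spec_minClauses clauses (minClauses clauses)

-- ===== LEMMAS AND PROOFS =====

theorem getClauseSize_eq (c : List Int) : getClauseSize c = (c.length : Int) := by
  unfold getClauseSize
  induction c with
  | nil => simp
  | cons x xs ih =>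
    simp only [List.foldl_cons, List.length_cons]
    have h : ∀ (l : List Int) (a : Int), l.foldl (fun counter _ => counter + 1) a = a + l.length := by
      intro l
      induction l with
      | nil => intro a; simp
      | cons y ys ih2 => intro a; simp [ih2]; ring
    simp [h]; ring

def pvStep (st : List (List Int) × Int) (clause : List Int) : List (List Int) × Int :=
  let clauseSize := getClauseSize clause
  if st.2 == -1 || clauseSize < st.2 then ([clause], clauseSize)
  else if clauseSize == st.2 then (st.1 ++ [clause], st.2)
  else st

def pvMinLen (cs : List (List Int)) (m : Int) : Int :=
  cs.foldl (fun a c => min a (c.length : Int)) m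

theorem pvMinLen_le (cs : List (List Int)) : ∀ m : Int, pvMinLen cs m ≤ m := by
  induction cs with
  | nil => intro m; simp [pvMinLen]
  | cons c cs ih =>
    intro m
    have : pvMinLen (c :: cs) m = pvMinLen cs (min m (c.length : Int)) := rfl
    rw [this]
    exact le_trans (ih _) (min_le_left _ _)

theorem pvLoop_char (cs : List (List Int)) : ∀ (acc : List (List Int)) (m : Int), 0 ≤ m →
    cs.foldl pvStep (acc, m) =
      ((if pvMinLen cs m = m then acc else []) ++ cs.filter (fun c => (c.length : Int) == pvMinLen cs m),
       pvMinLen cs m) := by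
  induction cs with
  | nil => intro acc m _; simp [pvMinLen]
  | cons c cs ih =>
    intro acc m hm
    have hstep : pvStep (acc, m) c =
        if (c.length : Int) < m then ([c], (c.length : Int))
        else if (c.length : Int) = m then (acc ++ [c], m)
        else (acc, m) := by
      simp only [pvStep, getClauseSize_eq]
      have hne : ¬ (m == -1) = true := by simp; omega
      simp only [hne, Bool.false_or]
      by_cases h1 : (c.length : Int) < m
      · simp [h1]
      · by_cases h2 : (c.length : Int) = m <;> simp [h1, h2]
    have hlen : (0 : Int) ≤ (c.length : Int) := by positivity
    simp only [List.foldl_cons, hstep]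
    by_cases h1 : (c.length : Int) < m
    · rw [if_pos h1, ih [c] _ hlen]
      have hml : pvMinLen (c :: cs) m = pvMinLen cs (c.length : Int) := by
        show pvMinLen cs (min m (c.length : Int)) = _
        rw [min_eq_right (le_of_lt h1)]
      have hMlt : pvMinLen cs (c.length : Int) < m :=
        lt_of_le_of_lt (pvMinLen_le cs _) h1
      rw [hml, List.filter_cons]
      have hne : pvMinLen cs (c.length : Int) ≠ m := by omega
      by_cases hc : pvMinLen cs (c.length : Int) = (c.length : Int)
      · have h2 : ¬((c.length : Int) = m) := by omega
        simp [hc, h2]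
      · have h3 : ((c.length : Int)) ≠ pvMinLen cs (c.length : Int) := fun h => hc h.symm
        simp [hc, hne, h3]
    · have hml : pvMinLen (c :: cs) m = pvMinLen cs m := by
        show pvMinLen cs (min m (c.length : Int)) = _
        by_cases h2 : (c.length : Int) = m
        · rw [h2, min_self]
        · rw [min_eq_left (by omega)]
      rw [if_neg h1]
      by_cases h2 : (c.length : Int) = m
      · rw [if_pos h2, ih (acc ++ [c]) _ hm, hml]
        rw [List.filter_cons]
        by_cases hMm : pvMinLen cs m = m
        · simp [hMm, h2, List.append_assoc]
        · have : ¬ ((c.length : Int) == pvMinLen cs m) = true := by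
            simp [h2]; omega
          simp [hMm, this]
      · rw [if_neg h2, ih acc _ hm, hml]
        have hMlt : pvMinLen cs m ≤ m := pvMinLen_le cs m
        rw [List.filter_cons]
        have : ¬ ((c.length : Int) == pvMinLen cs m) = true := by
          simp; omega
        simp [this]

-- ===== VERDICT (by name: the statement is the Claim_ definition above) =====
theorem minClauses_spec : Claim_equal_minClauses := by
  intro clauses _
  unfold Spec_minClauses minClauses minClauses_alt
  have hfun : (fun (st : List (List Int) × Int) clause =>
      let clauseSize := getClauseSize clause
      if st.2 == -1 || clauseSize < st.2 then ([clause], clauseSize)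
      else if clauseSize == st.2 then (st.1 ++ [clause], st.2)
      else st) = pvStep := rfl
  rw [hfun]
  cases clauses with
  | nil => simp
  | cons c cs =>
    have hstep0 : pvStep ([], -1) c = ([c], (c.length : Int)) := by
      simp [pvStep, getClauseSize_eq]
    simp only [List.foldl_cons, hstep0]
    rw [pvLoop_char cs [c] _ (by positivity)]
    have hmin : ((c :: cs).map (fun c => (c.length : Int))).min? =
        some (pvMinLen cs (c.length : Int)) := by
      rw [List.map_cons, List.min?_cons']
      congr 1
      rw [List.foldl_map]
      rfl
    rw [hmin]
    simp only [List.filter_cons]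
    have hMle : pvMinLen cs (c.length : Int) ≤ (c.length : Int) := pvMinLen_le cs _
    by_cases hc : pvMinLen cs (c.length : Int) = (c.length : Int)
    · simp [hc]
    · simp [Ne.symm hc, hc]
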